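-- pv_equiv track=rewrite | github.com/jbdanquah2/competitive-programming | C_Building_an_Aquarium.py | maxHeightOfTankRequired
-- ===== SOURCE A (Python) =====
-- def maxHeightOfTankRequired(n, x, arr):
--     left, right = 1, max(arr) + x  # Generously set the upper bound
--
--     while left < right:
--         mid = (left + right + 1) // 2
--         water_needed = sum(max(0, mid - height) for height in arr)
--
--         if water_needed <= x:
--             left = mid
--         else:
--             right = mid - 1
--
--     return left
-- ===== SOURCE B (Python) =====
-- def maxHeightOfTankRequired(n, x, arr):
--     # sort + prefix sums: for each k, the best level covering exactly the k
--     # smallest bars is (x + prefix_k) // k; take the max valid candidate.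
--     s = sorted(arr)
--     best, pref = 1, 0
--     for k in range(1, len(s) + 1):
--         pref += s[k - 1]
--         h = (x + pref) // k
--         if h >= s[k - 1] and (k == len(s) or h <= s[k]):
--             if h > best:
--                 best = h
--     return best
-- ===== Notes on version B (the rewrite author's own statement) =====
-- stated objective: faster
-- what changed: Replaces the binary search over heights (each step re-summing the whole array) with one sort + prefix-sum scan that solves h = (x + prefix_k) // k directly on the linear segment where it lies.
import Mathlib
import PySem

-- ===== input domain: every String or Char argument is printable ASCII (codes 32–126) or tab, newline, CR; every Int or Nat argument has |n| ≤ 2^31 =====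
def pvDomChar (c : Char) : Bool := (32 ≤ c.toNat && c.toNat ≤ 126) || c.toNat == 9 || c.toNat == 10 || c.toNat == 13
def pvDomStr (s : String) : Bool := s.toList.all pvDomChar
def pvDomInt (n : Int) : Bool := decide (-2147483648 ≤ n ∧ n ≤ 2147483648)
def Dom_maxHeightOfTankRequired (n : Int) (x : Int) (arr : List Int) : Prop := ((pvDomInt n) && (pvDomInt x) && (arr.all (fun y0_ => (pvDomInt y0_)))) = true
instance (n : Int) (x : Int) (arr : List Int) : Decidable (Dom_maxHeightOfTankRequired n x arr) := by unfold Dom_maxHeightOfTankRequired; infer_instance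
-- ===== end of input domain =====

-- B replaces A's binary search over water levels (each probe re-summing the array)
-- with a single sort + prefix-sum scan that solves for the level directly; objective: faster.

-- ===== PORT A =====
-- sum(max(0, mid - height) for height in arr)
def pvWater (arr : List Int) (mid : Int) : Int :=
  (arr.map (fun height => max 0 (mid - height))).sum

-- the while-loop of A, state (left, right)
def pvLoopA (x : Int) (arr : List Int) (left right : Int) : Int :=
  if left < right then
    if pvWater arr (PySem.Int.floordiv (left + right + 1) 2) ≤ x then
      pvLoopA x arr (PySem.Int.floordiv (left + right + 1) 2) right
    else
      pvLoopA x arr left (PySem.Int.floordiv (left + right + 1) 2 - 1)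
  else left
termination_by (right - left).toNat
decreasing_by
  · have h2 : left + right + 1 = (left + 1) + right := by ring
    have := PySem.Int.floordiv_two_mid_bounds (lo := left + 1) (hi := right) (by omega)
    rw [h2]; omega
  · have h2 : left + right + 1 = (left + 1) + right := by ring
    have := PySem.Int.floordiv_two_mid_bounds (lo := left + 1) (hi := right) (by omega)
    rw [h2]; omega

def maxHeightOfTankRequired (n : Int) (x : Int) (arr : List Int) : Int :=
  match PySem.List.max? arr (fun y => y) with
  | none => 0   -- Python: max([]) raises ValueError; excluded by Pre_
  | some m => pvLoopA x arr 1 (m + x)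

-- ===== PORT B =====
-- the acceptance test 'h >= s[k-1] and (k == len(s) or h <= s[k])':
-- the next element s[k] is the head of the unprocessed rest
def pvOk (v h : Int) (rest : List Int) : Bool :=
  decide (v ≤ h) && (match rest with | [] => true | w :: _ => decide (h ≤ w))

-- the for-loop of B over the sorted list; indexing s[k-1] / s[k] becomes
-- the current element / the head of the rest in a structural walk
def pvLoopB (x : Int) (k : Int) (pref : Int) (best : Int) : List Int → Int
  | [] => best
  | v :: rest =>
      pvLoopB x (k + 1) (pref + v)
        (if pvOk v (PySem.Int.floordiv (x + (pref + v)) k) rest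
         then max best (PySem.Int.floordiv (x + (pref + v)) k) else best) rest

def maxHeightOfTankRequired_alt (n : Int) (x : Int) (arr : List Int) : Int :=
  pvLoopB x 1 0 1 (PySem.List.sorted arr (fun y => y) false)

-- ===== PRECONDITION & SPEC =====
-- Pre_ excludes only the empty list, on which A's max(arr) raises ValueError.
def Pre_maxHeightOfTankRequired (n : Int) (x : Int) (arr : List Int) : Prop := arr ≠ []
instance (n : Int) (x : Int) (arr : List Int) : Decidable (Pre_maxHeightOfTankRequired n x arr) := by unfold Pre_maxHeightOfTankRequired; infer_instance

def pvWitness_maxHeightOfTankRequired : Int × Int × List Int := (3, 2, [1, 2, 3])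

def Spec_maxHeightOfTankRequired (n : Int) (x : Int) (arr : List Int) (out : Int) : Prop := out = maxHeightOfTankRequired_alt n x arr
instance (n : Int) (x : Int) (arr : List Int) (out : Int) : Decidable (Spec_maxHeightOfTankRequired n x arr out) := by unfold Spec_maxHeightOfTankRequired; infer_instance

-- ===== CLAIM (what is proved, stated in full; the proofs are below) =====
def Claim_equal_maxHeightOfTankRequired : Prop := ∀ (n : Int) (x : Int) (arr : List Int), Dom_maxHeightOfTankRequired n x arr → Pre_maxHeightOfTankRequired n x arr → Spec_maxHeightOfTankRequired n x arr (maxHeightOfTankRequired n x arr)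

-- ===== LEMMAS AND PROOFS =====

-- "v is the value the binary search characterises": ≥ 1, feasible-or-1,
-- no feasible level above it within [.., R], and bounded by max 1 R.
def pvGood (x : Int) (arr : List Int) (R v : Int) : Prop :=
  1 ≤ v ∧ (v = 1 ∨ pvWater arr v ≤ x) ∧
  (∀ h : Int, v < h → h ≤ R → x < pvWater arr h) ∧ v ≤ max 1 R

theorem pvWater_nonneg (arr : List Int) (h : Int) : 0 ≤ pvWater arr h := by
  apply List.sum_nonneg
  intro a ha
  simp only [List.mem_map] at ha
  obtain ⟨b, _, rfl⟩ := ha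
  exact le_max_left _ _

theorem pvWater_mono (arr : List Int) {a b : Int} (hab : a ≤ b) :
    pvWater arr a ≤ pvWater arr b := by
  induction arr with
  | nil => simp [pvWater]
  | cons hd tl ih =>
      simp only [pvWater, List.map_cons, List.sum_cons] at *
      have : max 0 (a - hd) ≤ max 0 (b - hd) := by omega
      omega

theorem pvWater_lb (arr : List Int) (h m : Int) (hm : m ∈ arr) :
    h - m ≤ pvWater arr h := by
  have h1 : max 0 (h - m) ∈ arr.map (fun height => max 0 (h - height)) :=
    List.mem_map.mpr ⟨m, hm, rfl⟩
  have h2 : max 0 (h - m) ≤ pvWater arr h := by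
    apply List.single_le_sum _ _ h1
    intro a ha
    simp only [List.mem_map] at ha
    obtain ⟨b, _, rfl⟩ := ha
    exact le_max_left _ _
  omega

theorem pvWater_perm {arr arr' : List Int} (hp : arr.Perm arr') (h : Int) :
    pvWater arr h = pvWater arr' h :=
  (hp.map _).sum_eq

theorem pvWater_split (A B : List Int) (h : Int)
    (hA : ∀ a ∈ A, a ≤ h) (hB : ∀ b ∈ B, h ≤ b) :
    pvWater (A ++ B) h = h * A.length - A.sum := by
  have hBzero : pvWater B h = 0 := by
    apply List.sum_eq_zero
    intro a ha
    simp only [List.mem_map] at ha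
    obtain ⟨b, hb, rfl⟩ := ha
    have := hB b hb
    omega
  have happ : pvWater (A ++ B) h = pvWater A h + pvWater B h := by
    simp [pvWater, List.map_append, List.sum_append]
  rw [happ, hBzero, add_zero]
  clear happ hBzero hB
  induction A with
  | nil => simp [pvWater]
  | cons a tl ih =>
      have ha : a ≤ h := hA a (by simp)
      have ih' := ih (fun b hb => hA b (by simp [hb]))
      simp only [pvWater, List.map_cons, List.sum_cons, List.length_cons] at *
      rw [max_eq_right (by omega), ih']
      push_cast
      ring

-- floordiv bracket for a positive divisor
theorem pvFdiv_le {a k : Int} (hk : 0 < k) : (PySem.Int.floordiv a k) * k ≤ a :=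
  (PySem.Int.le_floordiv_iff_mul_le hk).mp le_rfl

theorem pvLe_fdiv {a k q : Int} (hk : 0 < k) (h : q * k ≤ a) : q ≤ PySem.Int.floordiv a k :=
  (PySem.Int.le_floordiv_iff_mul_le hk).mpr h

-- uniqueness of a pvGood value
theorem pvGood_le {x : Int} {arr : List Int} {R v w : Int}
    (hv : pvGood x arr R v) (hw : pvGood x arr R w) : v ≤ w := by
  obtain ⟨hv1, hv2, _, hv4⟩ := hv
  obtain ⟨hw1, _, hw3, _⟩ := hw
  by_contra hcon
  have hwv : w < v := by omega
  have hv2' : pvWater arr v ≤ x := by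
    rcases hv2 with rfl | h2
    · omega
    · exact h2
  rcases le_total R 1 with hR | hR
  · rw [max_eq_left hR] at hv4; omega
  · rw [max_eq_right hR] at hv4
    exact absurd (hw3 v hwv hv4) (by omega)

theorem pvGood_unique {x : Int} {arr : List Int} {R v w : Int}
    (hv : pvGood x arr R v) (hw : pvGood x arr R w) : v = w :=
  le_antisymm (pvGood_le hv hw) (pvGood_le hw hv)

-- ===== A-side: the binary search computes a pvGood value =====

theorem pvLoopA_props (x : Int) (arr : List Int) (R : Int) :
    ∀ (N : ℕ) (left right : Int), (right - left).toNat ≤ N →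
    1 ≤ left → left ≤ right → right ≤ R →
    (left = 1 ∨ pvWater arr left ≤ x) →
    (∀ h : Int, right < h → h ≤ R → x < pvWater arr h) →
    (1 ≤ pvLoopA x arr left right ∧
     (pvLoopA x arr left right = 1 ∨ pvWater arr (pvLoopA x arr left right) ≤ x) ∧
     (∀ h : Int, pvLoopA x arr left right < h → h ≤ R → x < pvWater arr h) ∧
     pvLoopA x arr left right ≤ R) := by
  intro N
  induction N with
  | zero =>
      intro left right hfuel h1 h2 h3 hfe hub
      have hlr : ¬ left < right := by omega
      rw [pvLoopA, if_neg hlr]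
      refine ⟨h1, hfe, ?_, by omega⟩
      intro h hh hhR
      exact hub h (by omega) hhR
  | succ N ih =>
      intro left right hfuel h1 h2 h3 hfe hub
      by_cases hlr : left < right
      · have hmidb : left + 1 ≤ PySem.Int.floordiv ((left + 1) + right) 2 ∧
            PySem.Int.floordiv ((left + 1) + right) 2 ≤ right :=
          PySem.Int.floordiv_two_mid_bounds (by omega)
        have harg : left + right + 1 = (left + 1) + right := by ring
        set mid := PySem.Int.floordiv (left + right + 1) 2 with hmiddef
        have hmid : left + 1 ≤ mid ∧ mid ≤ right := by rw [hmiddef, harg]; exact hmidb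
        rw [pvLoopA, if_pos hlr]
        by_cases hw : pvWater arr mid ≤ x
        · rw [if_pos hw]
          exact ih mid right (by omega) (by omega) (by omega) h3 (Or.inr hw) hub
        · rw [if_neg hw]
          refine ih left (mid - 1) (by omega) h1 (by omega) (by omega) hfe ?_
          intro h hh hhR
          by_cases hhr : h ≤ right
          · have : pvWater arr mid ≤ pvWater arr h := pvWater_mono arr (by omega)
            omega
          · exact hub h (by omega) hhR
      · rw [pvLoopA, if_neg hlr]
        refine ⟨h1, hfe, ?_, by omega⟩
        intro h hh hhR
        exact hub h (by omega) hhR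

theorem pvA_good (x : Int) (arr : List Int) (m : Int) :
    pvGood x arr (m + x) (pvLoopA x arr 1 (m + x)) := by
  by_cases hR : 1 ≤ m + x
  · have h := pvLoopA_props x arr (m + x) (m + x - 1).toNat 1 (m + x) (by omega)
      le_rfl hR le_rfl (Or.inl rfl) (by intro h hh hhR; omega)
    refine ⟨h.1, h.2.1, h.2.2.1, ?_⟩
    have := h.2.2.2
    rcases le_total (m + x) 1 with h' | h' <;> simp [h'] <;> omega
  · have hloop : pvLoopA x arr 1 (m + x) = 1 := by
      rw [pvLoopA, if_neg (by omega)]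
    rw [hloop]
    refine ⟨le_rfl, Or.inl rfl, by intro h hh hhR; omega, le_max_left _ _⟩

-- ===== B-side lemmas =====

theorem pvBest_le_update (v h : Int) (rest : List Int) (best : Int) :
    best ≤ (if pvOk v h rest then max best h else best) := by
  split
  · exact le_max_left _ _
  · exact le_rfl

theorem pvLoopB_ge_best (x : Int) :
    ∀ (cur : List Int) (k pref best : Int), best ≤ pvLoopB x k pref best cur := by
  intro cur
  induction cur with
  | nil => intro k pref best; simp [pvLoopB]
  | cons v rest ih =>
      intro k pref best
      rw [pvLoopB]
      exact le_trans (pvBest_le_update _ _ _ _) (ih _ _ _)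

-- run B's loop through a prefix
theorem pvLoopB_skip (x : Int) :
    ∀ (done cur : List Int) (k pref best : Int),
    ∃ best', best ≤ best' ∧
      pvLoopB x k pref best (done ++ cur) =
      pvLoopB x (k + done.length) (pref + done.sum) best' cur := by
  intro done
  induction done with
  | nil => intro cur k pref best; exact ⟨best, le_rfl, by simp⟩
  | cons d dt ih =>
      intro cur k pref best
      rw [List.cons_append, pvLoopB]
      obtain ⟨best', hb, heq⟩ := ih cur (k + 1) (pref + d)
        (if pvOk d (PySem.Int.floordiv (x + (pref + d)) k) (dt ++ cur)
         then max best (PySem.Int.floordiv (x + (pref + d)) k) else best)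
      refine ⟨best', le_trans (pvBest_le_update _ _ _ _) hb, ?_⟩
      rw [heq]
      have e1 : k + 1 + (dt.length : Int) = k + ((d :: dt).length : Int) := by
        push_cast [List.length_cons]
        ring
      have e2 : pref + d + dt.sum = pref + (d :: dt).sum := by simp; ring
      rw [e1, e2]

-- the accepted candidate at any split is a lower bound on B's result
theorem pvBest_ge_candidate (x : Int) (done : List Int) (v : Int) (rest : List Int)
    (hv : v ≤ PySem.Int.floordiv (x + (done.sum + v)) ((done.length : Int) + 1))
    (hr : ∀ w ∈ rest.head?, PySem.Int.floordiv (x + (done.sum + v)) ((done.length : Int) + 1) ≤ w) :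
    PySem.Int.floordiv (x + (done.sum + v)) ((done.length : Int) + 1) ≤
      pvLoopB x 1 0 1 (done ++ v :: rest) := by
  obtain ⟨best', _, heq⟩ := pvLoopB_skip x done (v :: rest) 1 0 1
  rw [heq, pvLoopB]
  have e1 : (1 : Int) + done.length = (done.length : Int) + 1 := by ring
  have e2 : (0 : Int) + done.sum + v = done.sum + v := by ring
  rw [e1, e2]
  have hok : pvOk v (PySem.Int.floordiv (x + (done.sum + v)) ((done.length : Int) + 1)) rest = true := by
    unfold pvOk
    simp only [Bool.and_eq_true, decide_eq_true_eq]
    refine ⟨hv, ?_⟩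
    cases rest with
    | nil => rfl
    | cons w rest' => simpa using hr w rfl
  rw [if_pos hok]
  exact le_trans (le_max_right _ _) (pvLoopB_ge_best x _ _ _ _)

-- soundness: B's result is 1 or feasible
theorem pvLoopB_sound (x : Int) :
    ∀ (cur done : List Int) (best : Int),
    (done ++ cur).Pairwise (· ≤ ·) → 1 ≤ best →
    (best = 1 ∨ pvWater (done ++ cur) best ≤ x) →
    (1 ≤ pvLoopB x ((done.length : Int) + 1) done.sum best cur ∧
     (pvLoopB x ((done.length : Int) + 1) done.sum best cur = 1 ∨
      pvWater (done ++ cur) (pvLoopB x ((done.length : Int) + 1) done.sum best cur) ≤ x)) := by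
  intro cur
  induction cur with
  | nil =>
      intro done best hpw hb hfe
      rw [List.append_nil] at hfe ⊢
      exact ⟨by simpa [pvLoopB] using hb, by simpa [pvLoopB] using hfe⟩
  | cons v rest ih =>
      intro done best hpw hb hfe
      rw [pvLoopB]
      set h := PySem.Int.floordiv (x + (done.sum + v)) ((done.length : Int) + 1) with hhdef
      have hlist : done ++ v :: rest = (done ++ [v]) ++ rest := by simp
      have hpw' : ((done ++ [v]) ++ rest).Pairwise (· ≤ ·) := by rwa [← hlist]
      have hsplitpw := List.pairwise_append.mp hpw
      -- feasibility of an accepted candidate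
      have hcand : v ≤ h → (∀ w ∈ rest.head?, h ≤ w) →
          pvWater (done ++ v :: rest) h ≤ x := by
        intro hok1 hok2
        have hA : ∀ a ∈ done ++ [v], a ≤ h := by
          intro a ha
          rcases List.mem_append.mp ha with ha | ha
          · have hav : a ≤ v := hsplitpw.2.2 a ha v (by simp)
            omega
          · simp at ha; omega
        have hB : ∀ b ∈ rest, h ≤ b := by
          intro b hbmem
          cases rest with
          | nil => simp at hbmem
          | cons w rest' =>
              have hw : h ≤ w := hok2 w rfl
              rcases List.mem_cons.mp hbmem with rfl | hbm
              · exact hw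
              · have hpr : (v :: w :: rest').Pairwise (· ≤ ·) := hsplitpw.2.1
                have hwb : w ≤ b := (List.pairwise_cons.mp (List.pairwise_cons.mp hpr).2).1 b hbm
                omega
        have hsplit := pvWater_split (done ++ [v]) rest h hA hB
        rw [hlist, hsplit]
        have hfd : h * ((done.length : Int) + 1) ≤ x + (done.sum + v) :=
          pvFdiv_le (by positivity)
        simp only [List.length_append, List.sum_append, List.length_cons, List.length_nil,
          List.sum_cons, List.sum_nil]
        push_cast
        nlinarith [hfd]
      -- apply the induction hypothesis with done := done ++ [v]
      have hstep := ih (done ++ [v])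
        (if pvOk v h rest then max best h else best)
        hpw'
        (le_trans hb (pvBest_le_update _ _ _ _))
        (by
          by_cases hok : pvOk v h rest = true
          · rw [if_pos hok]
            unfold pvOk at hok
            simp only [Bool.and_eq_true, decide_eq_true_eq] at hok
            obtain ⟨hok1, hok2⟩ := hok
            have hok2' : ∀ w ∈ rest.head?, h ≤ w := by
              cases rest with
              | nil => intro w hw; simp at hw
              | cons w rest' =>
                  intro w' hw'
                  simp only [List.head?_cons, Option.mem_def, Option.some.injEq] at hw'
                  subst hw'
                  simpa using hok2
            rcases le_total h best with hbh | hbh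
            · rw [max_eq_left hbh, ← hlist]; exact hfe
            · rw [max_eq_right hbh, ← hlist]
              exact Or.inr (hcand hok1 hok2')
          · rw [if_neg hok, ← hlist]; exact hfe)
      have hlen : ((done ++ [v]).length : Int) + 1 = (done.length : Int) + 1 + 1 := by
        simp
      have hsum : (done ++ [v]).sum = done.sum + v := by simp
      rw [hlen, hsum, ← hlist] at hstep
      exact hstep

-- the head of a dropWhile fails the predicate
theorem pvDropWhile_head_not (p : Int → Bool) :
    ∀ (l : List Int) (w : Int) (t : List Int), l.dropWhile p = w :: t → p w = false := by
  intro l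
  induction l with
  | nil => intro w t hd; simp [List.dropWhile] at hd
  | cons a l ih =>
      intro w t hd
      rw [List.dropWhile_cons] at hd
      by_cases hp : p a = true
      · rw [if_pos hp] at hd; exact ih w t hd
      · rw [if_neg hp] at hd
        obtain ⟨rfl, rfl⟩ := List.cons.inj hd
        simpa using hp

-- completeness: every feasible level is ≤ B's result (sorted input)
theorem pvFeasible_le_best (x : Int) (s : List Int)
    (hpw : s.Pairwise (· ≤ ·)) (hne : s ≠ []) :
    ∀ h : Int, pvWater s h ≤ x → h ≤ pvLoopB x 1 0 1 s := by
  suffices H : ∀ (c : ℕ) (h : Int), s.countP (fun a => decide (h < a)) = c →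
      pvWater s h ≤ x → h ≤ pvLoopB x 1 0 1 s by
    intro h hfe
    exact H _ h rfl hfe
  intro c
  induction c using Nat.strong_induction_on with
  | _ c ih =>
  intro h hc hfe
  set p : Int → Bool := fun a => decide (a ≤ h) with hpdef
  set done := s.takeWhile p with hddef
  set cur := s.dropWhile p with hcdef
  have hsplit : done ++ cur = s := List.takeWhile_append_dropWhile
  have hdone : ∀ a ∈ done, a ≤ h := by
    intro a ha
    have := List.mem_takeWhile_imp ha
    rw [hpdef] at this
    exact of_decide_eq_true this
  cases hcur : cur with
  | nil =>
      -- every element is ≤ h: the last candidate dominates h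
      have hds : done = s := by rw [← hsplit, hcur, List.append_nil]
      have hall : ∀ a ∈ s, a ≤ h := by rw [← hds]; exact hdone
      have hwx : pvWater s h = h * s.length - s.sum := by
        have := pvWater_split s [] h hall (by simp)
        simpa using this
      have hlen : 0 < (s.length : Int) := by
        cases s with
        | nil => exact absurd rfl hne
        | cons a t => exact_mod_cast Nat.succ_pos t.length
      have hh0 : h ≤ PySem.Int.floordiv (x + s.sum) s.length :=
        pvLe_fdiv hlen (by omega)
      set v := s.getLast hne with hvdef
      set done' := s.dropLast with hd'def
      have hsplit2 : done' ++ [v] = s := List.dropLast_append_getLast hne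
      have hlen2 : (done'.length : Int) + 1 = s.length := by
        rw [← hsplit2]; simp
      have hsum2 : done'.sum + v = s.sum := by
        rw [← hsplit2]; simp
      have hcand := pvBest_ge_candidate x done' v []
        (by
          rw [hsum2, hlen2]
          exact le_trans (hall v (s.getLast_mem hne)) hh0)
        (by intro w hw; simp at hw)
      rw [hsum2, hlen2] at hcand
      have hlist : done' ++ v :: ([] : List Int) = s := by simpa using hsplit2
      rw [hlist] at hcand
      omega
  | cons w cur' =>
      have hw : h < w := by
        have := pvDropWhile_head_not p s w cur' (by rw [← hcdef, hcur])
        rw [hpdef] at this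
        simpa using this
      have hcurpw : (w :: cur').Pairwise (· ≤ ·) := by
        rw [← hcur, hcdef]
        exact hpw.sublist (List.dropWhile_sublist _)
      have hcw : ∀ b ∈ cur, w ≤ b := by
        rw [hcur]
        intro b hb
        rcases List.mem_cons.mp hb with rfl | hb'
        · exact le_rfl
        · exact (List.pairwise_cons.mp hcurpw).1 b hb'
      -- the count of elements above h is cur.length
      have hcount : s.countP (fun a => decide (h < a)) = cur.length := by
        rw [← hsplit, List.countP_append]
        have h1 : done.countP (fun a => decide (h < a)) = 0 := by
          rw [List.countP_eq_zero]
          intro a ha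
          have := hdone a ha
          simpa using (by omega : ¬ h < a)
        have h2 : cur.countP (fun a => decide (h < a)) = cur.length := by
          rw [List.countP_eq_length]
          intro b hb
          have := hcw b hb
          simpa using (by omega : h < b)
        omega
      -- the IH applies to any feasible w (its above-count is smaller)
      have hihw : pvWater s w ≤ x → w ≤ pvLoopB x 1 0 1 s := by
        intro hfw
        have hwcount : s.countP (fun a => decide (w < a)) < c := by
          rw [← hsplit, List.countP_append]
          have h1 : done.countP (fun a => decide (w < a)) = 0 := by
            rw [List.countP_eq_zero]
            intro a ha
            have := hdone a ha
            simpa using (by omega : ¬ w < a)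
          have h2 : cur.countP (fun a => decide (w < a)) < cur.length := by
            apply lt_of_le_of_ne List.countP_le_length
            intro heq
            have := (List.countP_eq_length.mp heq) w (by rw [hcur]; simp)
            simp at this
          omega
        exact ih _ hwcount w rfl hfw
      cases hdone' : done with
      | nil =>
          -- no bar is ≤ h: level w costs nothing
          have hsw : ∀ b ∈ s, w ≤ b := by
            rw [← hsplit, hdone']
            simpa using hcw
          have hw0 : pvWater s w = 0 := by
            have := pvWater_split [] s w (by simp) hsw
            simpa using this
          have hx0 : 0 ≤ x := le_trans (pvWater_nonneg s h) hfe
          have := hihw (by omega)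
          omega
      | cons d dt =>
          have hdne : done ≠ [] := by rw [hdone']; simp
          have hk : 0 < (done.length : Int) := by rw [hdone']; exact_mod_cast Nat.succ_pos dt.length
          set k : Int := (done.length : Int) with hkdef
          have hwx : pvWater s h = h * k - done.sum := by
            rw [← hsplit]
            exact pvWater_split done cur h hdone (fun b hb => by have := hcw b hb; omega)
          set h0 := PySem.Int.floordiv (x + done.sum) k with hh0def
          have hhle : h ≤ h0 := pvLe_fdiv hk (by omega)
          set v := done.getLast hdne with hvdef
          set done' := done.dropLast with hd'def
          have hsplit2 : done' ++ [v] = done := List.dropLast_append_getLast hdne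
          have hlen2 : (done'.length : Int) + 1 = k := by
            rw [hkdef, ← hsplit2]; simp
          have hsum2 : done'.sum + v = done.sum := by
            rw [← hsplit2]; simp
          by_cases hcase : h0 ≤ w
          · -- the candidate for this block is accepted and dominates h
            have hcand := pvBest_ge_candidate x done' v cur
              (by
                rw [hsum2, hlen2]
                exact le_trans (hdone v (done.getLast_mem hdne)) hhle)
              (by
                rw [hsum2, hlen2, hcur]
                intro w' hw'
                simp only [List.head?_cons, Option.mem_def, Option.some.injEq] at hw'
                subst hw'
                exact hcase)
            rw [hsum2, hlen2] at hcand
            have hlist : done' ++ v :: cur = s := by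
              rw [← hsplit, ← hsplit2]
              simp
            rw [hlist] at hcand
            omega
          · -- the candidate overshoots the next bar: that bar is itself feasible
            have hfw : pvWater s w ≤ x := by
              have hws : pvWater s w = w * k - done.sum := by
                rw [← hsplit]
                exact pvWater_split done cur w
                  (fun a ha => by have := hdone a ha; omega) hcw
              have hfd : h0 * k ≤ x + done.sum := pvFdiv_le hk
              have hwk : w * k ≤ (h0 - 1) * k :=
                mul_le_mul_of_nonneg_right (by omega) (by omega)
              nlinarith [hwk, hfd, hk]
            have := hihw hfw
            omega

-- B's result is pvGood
theorem pvB_good (x : Int) (arr : List Int) (m : Int)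
    (hm : PySem.List.max? arr (fun y => y) = some m) :
    pvGood x arr (m + x) (maxHeightOfTankRequired_alt 0 x arr) := by
  have hmem : m ∈ arr := PySem.List.max?_mem hm
  have hne : arr ≠ [] := by intro hn; rw [hn] at hmem; simp at hmem
  set s := PySem.List.sorted arr (fun y => y) false with hsdef
  have hperm : s.Perm arr := PySem.List.sorted_perm arr (fun y => y) false
  have hpw : s.Pairwise (· ≤ ·) := by
    have := PySem.List.sorted_pairwise (xs := arr) (key := fun y => y)
    simpa using this
  have hsne : s ≠ [] := by
    intro hn
    exact hne ((hn ▸ hperm : ([] : List Int).Perm arr).symm.eq_nil)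
  have hwater : ∀ h : Int, pvWater s h = pvWater arr h := pvWater_perm hperm
  have halt : maxHeightOfTankRequired_alt 0 x arr = pvLoopB x 1 0 1 s := rfl
  rw [halt]
  have hsound := pvLoopB_sound x s [] 1 (by simpa using hpw) le_rfl (Or.inl rfl)
  simp only [List.length_nil, List.sum_nil, List.nil_append, Nat.cast_zero, zero_add] at hsound
  obtain ⟨hs1, hs2⟩ := hsound
  have hcomp := pvFeasible_le_best x s hpw hsne
  refine ⟨hs1, ?_, ?_, ?_⟩
  · rcases hs2 with h2 | h2
    · exact Or.inl h2
    · exact Or.inr (by rwa [hwater] at h2)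
  · intro h hlt hR
    by_contra hnot
    have hfe : pvWater s h ≤ x := by rw [hwater]; omega
    have := hcomp h hfe
    omega
  · rcases hs2 with h2 | h2
    · rw [h2]; exact le_max_left _ _
    · have hlb := pvWater_lb arr (pvLoopB x 1 0 1 s) m hmem
      rw [hwater] at h2
      exact le_trans (by omega) (le_max_right 1 (m + x))

-- ===== VERDICT (by name: the statement is the Claim_ definition above) =====
theorem maxHeightOfTankRequired_spec : Claim_equal_maxHeightOfTankRequired := by
  intro n x arr _ hpre
  unfold Spec_maxHeightOfTankRequired
  unfold Pre_maxHeightOfTankRequired at hpre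
  obtain ⟨m, hm⟩ : ∃ m, PySem.List.max? arr (fun y => y) = some m := by
    cases hmax : PySem.List.max? arr (fun y => y) with
    | none => exact absurd ((PySem.List.max?_eq_none_iff (xs := arr) (key := fun y => y)).mp hmax) hpre
    | some m => exact ⟨m, rfl⟩
  have hA : maxHeightOfTankRequired n x arr = pvLoopA x arr 1 (m + x) := by
    unfold maxHeightOfTankRequired; rw [hm]
  have hBalt : maxHeightOfTankRequired_alt n x arr = maxHeightOfTankRequired_alt 0 x arr := rfl
  rw [hA, hBalt]
  exact pvGood_unique (pvA_good x arr m) (pvB_good x arr m hm)
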